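-- pv_equiv track=rewrite | github.com/LeeNuss/econext | sensor.py | decode_schedule_bitfield
-- ===== SOURCE A (Python) =====
-- def decode_schedule_bitfield(value: int, is_am: bool = True) -> str:
--     """
--     Decode a schedule bitfield into human-readable time ranges.
--
--     Args:
--         value: uint32 bitfield where each bit = 30-minute slot
--         is_am: True for AM schedule (00:00-11:30), False for PM (12:00-23:30)
--
--     Returns:
--         String like "06:00-09:30, 17:00-21:00" or "No active periods"
--     """
--     if value == 0:
--         return "No active periods"
--
--     ranges = []
--     start_bit = None
--     start_offset = 0 if is_am else 24  # PM schedules start at 12:00 (24 half-hours)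
--
--     for bit in range(24):  # 24 half-hour slots
--         is_set = (value >> bit) & 1
--
--         if is_set and start_bit is None:
--             start_bit = bit
--         elif not is_set and start_bit is not None:
--             # End of range
--             start_hour = (start_offset + start_bit) // 2
--             start_min = ((start_offset + start_bit) % 2) * 30
--             end_hour = (start_offset + bit) // 2
--             end_min = ((start_offset + bit) % 2) * 30
--             ranges.append(f"{start_hour:02d}:{start_min:02d}-{end_hour:02d}:{end_min:02d}")
--             start_bit = None
--
--     # Handle range extending to end
--     if start_bit is not None:
--         start_hour = (start_offset + start_bit) // 2
--         start_min = ((start_offset + start_bit) % 2) * 30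
--         end_hour = (start_offset + 24) // 2
--         end_min = 0
--         ranges.append(f"{start_hour:02d}:{start_min:02d}-{end_hour:02d}:{end_min:02d}")
--
--     return ", ".join(ranges)
-- ===== SOURCE B (Python) =====
-- def _hhmm(offset):
--     """Half-hour offset -> 'HH:MM'."""
--     h, half = divmod(offset, 2)
--     return f"{h:02d}:{half * 30:02d}"
--
--
-- def decode_schedule_bitfield(value: int, is_am: bool = True) -> str:
--     if value == 0:
--         return "No active periods"
--
--     base = 0 if is_am else 24
--     bits = [i for i in range(24) if (value >> i) & 1]
--
--     runs = []  # maximal consecutive runs as (first, last) pairs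
--     for i in bits:
--         if runs and runs[-1][1] + 1 == i:
--             runs[-1] = (runs[-1][0], i)
--         else:
--             runs.append((i, i))
--
--     return ", ".join(f"{_hhmm(base + s)}-{_hhmm(base + e + 1)}" for s, e in runs)
-- ===== Notes on version B (the rewrite author's own statement) =====
-- stated objective: simpler
-- what changed: Replaces A's single stateful scan (open/close a pending range while iterating bits with a start_bit sentinel and a post-loop tail case) by a pipeline: list the set bit indices, group them into maximal consecutive (first, last) runs, and format each run, which removes the sentinel state and the duplicated tail formatting.
import Mathlib
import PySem

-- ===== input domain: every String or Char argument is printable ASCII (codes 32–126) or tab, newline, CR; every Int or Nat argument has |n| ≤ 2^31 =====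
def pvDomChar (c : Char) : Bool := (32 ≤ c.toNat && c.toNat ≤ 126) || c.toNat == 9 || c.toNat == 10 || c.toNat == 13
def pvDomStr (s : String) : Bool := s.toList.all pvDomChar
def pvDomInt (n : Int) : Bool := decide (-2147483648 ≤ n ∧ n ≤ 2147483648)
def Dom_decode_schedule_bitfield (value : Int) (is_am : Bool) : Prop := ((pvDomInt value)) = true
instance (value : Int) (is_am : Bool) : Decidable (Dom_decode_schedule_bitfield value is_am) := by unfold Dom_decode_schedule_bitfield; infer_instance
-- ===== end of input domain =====

-- B re-decomposes A's stateful scan as: list the set bits, group them into maximal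
-- consecutive runs, format each run (objective: simpler; same cost).

-- ===== PORT A =====
-- f"{h:02d}" for the nonneg values reached here = str(h).zfill(2) (exact there)
def pvSlotA (h m : Int) : String :=
  PySem.Str.zfill (PySem.Int.toStr h) 2 ++ ":" ++ PySem.Str.zfill (PySem.Int.toStr m) 2

-- the range string A appends when a run starting at start_bit s ends at bit
def pvFmtA (off s bit : Int) : String :=
  pvSlotA (PySem.Int.floordiv (off + s) 2) (PySem.Int.mod (off + s) 2 * 30) ++ "-" ++
    pvSlotA (PySem.Int.floordiv (off + bit) 2) (PySem.Int.mod (off + bit) 2 * 30)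

-- one iteration of A's for-loop (state = (ranges, start_bit)); bits run over 0..23 so .toNat is exact
def pvAStep (value off : Int) (st : List String × Option Int) (bit : Int) : List String × Option Int :=
  let is_set := PySem.Int.band (value >>> bit.toNat) 1
  match st with
  | (ranges, none) => if is_set != 0 then (ranges, some bit) else (ranges, none)
  | (ranges, some s) => if is_set != 0 then (ranges, some s) else (ranges ++ [pvFmtA off s bit], none)

def decode_schedule_bitfield (value : Int) (is_am : Bool) : String :=
  if value = 0 then "No active periods"
  else
    let start_offset : Int := if is_am then 0 else 24
    match (PySem.List.pyRange 0 24 1).foldl (pvAStep value start_offset) ([], none) with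
    | (ranges, some s) =>
        -- range extending to the end: end_hour = (off+24)//2, end_min = 0
        PySem.Str.join ", " (ranges ++
          [pvSlotA (PySem.Int.floordiv (start_offset + s) 2) (PySem.Int.mod (start_offset + s) 2 * 30) ++ "-" ++
            pvSlotA (PySem.Int.floordiv (start_offset + 24) 2) 0])
    | (ranges, none) => PySem.Str.join ", " ranges

-- ===== PORT B =====
-- _hhmm(offset): divmod(offset, 2); f"{h:02d}:{half*30:02d}" = zfill-2 pieces (nonneg here, exact)
def pvHHMM (offset : Int) : String :=
  PySem.Str.zfill (PySem.Int.toStr (PySem.Int.floordiv offset 2)) 2 ++ ":" ++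
    PySem.Str.zfill (PySem.Int.toStr (PySem.Int.mod offset 2 * 30)) 2

-- one iteration of B's run-grouping loop (runs[-1] / runs.append)
def pvRunStep (runs : List (Int × Int)) (i : Int) : List (Int × Int) :=
  match runs.getLast? with
  | some (s, e) => if e + 1 = i then runs.dropLast ++ [(s, i)] else runs ++ [(i, i)]
  | none => runs ++ [(i, i)]

-- the f-string B builds for a run (s, e)
def pvFmtB (base : Int) (p : Int × Int) : String :=
  pvHHMM (base + p.1) ++ "-" ++ pvHHMM (base + p.2 + 1)

def decode_schedule_bitfield_alt (value : Int) (is_am : Bool) : String :=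
  if value = 0 then "No active periods"
  else
    let base : Int := if is_am then 0 else 24
    let bits := (PySem.List.pyRange 0 24 1).filter (fun i => PySem.Int.band (value >>> i.toNat) 1 != 0)
    let runs := bits.foldl pvRunStep []
    PySem.Str.join ", " (runs.map (pvFmtB base))

-- ===== PRECONDITION & SPEC =====
def Spec_decode_schedule_bitfield (value : Int) (is_am : Bool) (out : String) : Prop := out = decode_schedule_bitfield_alt value is_am
instance (value : Int) (is_am : Bool) (out : String) : Decidable (Spec_decode_schedule_bitfield value is_am out) := by unfold Spec_decode_schedule_bitfield; infer_instance

-- ===== CLAIM (what is proved, stated in full; the proofs are below) =====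
def Claim_equal_decode_schedule_bitfield : Prop := ∀ (value : Int) (is_am : Bool), Dom_decode_schedule_bitfield value is_am → Spec_decode_schedule_bitfield value is_am (decode_schedule_bitfield value is_am)

-- ===== LEMMAS AND PROOFS =====

-- proof-side views of the two loops, as folds over List.range n
def pvBit (value i : Int) : Bool := PySem.Int.band (value >>> i.toNat) 1 != 0

def pvA (value off : Int) (n : Nat) : List String × Option Int :=
  (List.range n).foldl (fun st i => pvAStep value off st (i : Int)) ([], none)

def pvR (value : Int) (n : Nat) : List (Int × Int) :=
  (List.range n).foldl (fun r i => if pvBit value (i : Int) then pvRunStep r (i : Int) else r) []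

-- closing a run at bit e+1 formats exactly B's string for the run (s, e)
lemma pvFmt_close (off s e : Int) : pvFmtA off s (e + 1) = pvFmtB off (s, e) := by
  simp only [pvFmtA, pvFmtB, pvHHMM, pvSlotA]
  rw [show off + (e + 1) = off + e + 1 by ring]

-- the loop invariant tying A's scan state to B's run list
lemma pvInv (value off : Int) (n : Nat) :
    ((pvA value off n).2 = none ∧ (pvA value off n).1 = (pvR value n).map (pvFmtB off) ∧
      (∀ s e, (pvR value n).getLast? = some (s, e) → e + 1 < (n : Int)))
    ∨ (∃ s, (pvA value off n).2 = some s ∧ (pvR value n).getLast? = some (s, (n : Int) - 1) ∧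
        (pvA value off n).1 = ((pvR value n).dropLast).map (pvFmtB off)) := by
  induction n with
  | zero => left; simp [pvA, pvR]
  | succ n ih =>
    have hA : pvA value off (n + 1) = pvAStep value off (pvA value off n) (n : Int) := by
      simp [pvA, List.range_succ]
    have hR : pvR value (n + 1) =
        (if pvBit value (n : Int) then pvRunStep (pvR value n) (n : Int) else pvR value n) := by
      simp [pvR, List.range_succ]
    rcases hpa : pvA value off n with ⟨rs, st⟩
    rw [hpa] at hA ih
    have htn : ((n : Int)).toNat = n := by simp
    rcases ih with ⟨h2, h1, hlast⟩ | ⟨s, h2, hlast, h1⟩ <;> simp only at h2 h1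
    · subst h2
      by_cases hb : pvBit value (n : Int)
      · -- open a new run
        right
        have hstep : pvRunStep (pvR value n) (n : Int) = pvR value n ++ [((n : Int), (n : Int))] := by
          unfold pvRunStep
          rcases hgl : (pvR value n).getLast? with _ | ⟨s, e⟩
          · rfl
          · have := hlast s e hgl
            simp [show ¬ (e + 1 = (n : Int)) by omega]
        have hb' : ¬ PySem.Int.band (value >>> n) 1 = 0 := by
          simpa [pvBit] using hb
        refine ⟨(n : Int), ?_, ?_, ?_⟩
        · rw [hA]; simp [pvAStep, htn, hb']
        · rw [hR, if_pos hb, hstep]; push_cast; simp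
        · rw [hA, hR, if_pos hb, hstep]
          simp [pvAStep, htn, hb', h1]
      · -- nothing set, nothing open
        left
        have hb' : PySem.Int.band (value >>> n) 1 = 0 := by
          simpa [pvBit] using hb
        have hA' : pvA value off (n + 1) = (rs, none) := by
          rw [hA]; simp [pvAStep, htn, hb']
        rw [hA', hR, if_neg hb]
        exact ⟨rfl, h1, fun s e hgl => by have := hlast s e hgl; push_cast; omega⟩
    · subst h2
      by_cases hb : pvBit value (n : Int)
      · -- extend the open run
        right
        have hstep : pvRunStep (pvR value n) (n : Int) =
            (pvR value n).dropLast ++ [(s, (n : Int))] := by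
          unfold pvRunStep
          rw [hlast]
          simp [show (n : Int) - 1 + 1 = (n : Int) by ring]
        have hb' : ¬ PySem.Int.band (value >>> n) 1 = 0 := by
          simpa [pvBit] using hb
        have hA' : pvA value off (n + 1) = (rs, some s) := by
          rw [hA]; simp [pvAStep, htn, hb']
        refine ⟨s, ?_, ?_, ?_⟩
        · simp only [hA']
        · rw [hR, if_pos hb, hstep]; push_cast; simp
        · simp only [hA', hR, if_pos hb, hstep, List.dropLast_concat]; exact h1
      · -- close the run: A appends the formatted range, B's run list is unchanged
        left
        have hRl : (pvR value n).dropLast ++ [(s, (n : Int) - 1)] = pvR value n :=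
          List.dropLast_append_getLast? _ hlast
        have hb' : PySem.Int.band (value >>> n) 1 = 0 := by
          simpa [pvBit] using hb
        have hA' : pvA value off (n + 1) = (rs ++ [pvFmtA off s (n : Int)], none) := by
          rw [hA]; simp [pvAStep, htn, hb']
        have hfmt : pvFmtA off s (n : Int) = pvFmtB off (s, (n : Int) - 1) := by
          have h := pvFmt_close off s ((n : Int) - 1)
          rwa [show (n : Int) - 1 + 1 = (n : Int) by ring] at h
        refine ⟨?_, ?_, ?_⟩
        · simp only [hA']
        · simp only [hA', hR, if_neg hb]
          rw [h1, hfmt, show List.map (pvFmtB off) (pvR value n).dropLast ++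
              [pvFmtB off (s, (n : Int) - 1)] =
              List.map (pvFmtB off) ((pvR value n).dropLast ++ [(s, (n : Int) - 1)]) by simp, hRl]
        · rw [hR, if_neg hb]
          intro s' e' hgl
          rw [hlast] at hgl
          cases hgl
          push_cast; omega

-- B's filtered fold over range(24) is pvR 24
lemma pvAlt_runs (value : Int) :
    ((PySem.List.pyRange 0 24 1).filter
        (fun i => PySem.Int.band (value >>> i.toNat) 1 != 0)).foldl pvRunStep [] = pvR value 24 := by
  rw [← PySem.List.foldl_if_eq_foldl_filter]
  rw [show ((24 : Int)) = ((24 : Nat) : Int) by norm_num, PySem.List.pyRange_zero_natCast]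
  have hmap : pvR value 24 = List.foldl
      (fun r (j : Int) => if pvBit value j then pvRunStep r j else r) []
      (List.map (fun k : Nat => (k : Int)) (List.range 24)) := by
    rw [List.foldl_map]; rfl
  rw [hmap]
  refine PySem.List.foldl_congr_mem _ _ _ _ ?_
  intro acc y hy
  obtain ⟨k, -, rfl⟩ := List.mem_map.mp hy
  simp [pvBit, Int.shiftRight_natCast_right]

-- A's fold over range(24) is pvA 24
lemma pvA_fold (value off : Int) :
    (PySem.List.pyRange 0 24 1).foldl (pvAStep value off) ([], none) = pvA value off 24 := by
  rw [show ((24 : Int)) = ((24 : Nat) : Int) by norm_num, PySem.List.pyRange_zero_natCast,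
    List.foldl_map]
  rfl

-- ===== VERDICT (by name: the statement is the Claim_ definition above) =====
theorem decode_schedule_bitfield_spec : Claim_equal_decode_schedule_bitfield := by
  intro value is_am _
  unfold Spec_decode_schedule_bitfield decode_schedule_bitfield decode_schedule_bitfield_alt
  by_cases h0 : value = 0
  · simp [h0]
  · simp only [if_neg h0]
    set off : Int := if is_am then 0 else 24 with hoff
    have hoff2 : PySem.Int.mod (off + 24) 2 = 0 := by
      rcases is_am with _ | _ <;> simp [hoff]
    rw [pvAlt_runs, pvA_fold]
    rcases hpa : pvA value off 24 with ⟨rs, st⟩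
    rcases pvInv value off 24 with ⟨h2, h1, _⟩ | ⟨s, h2, hlast, h1⟩ <;> rw [hpa] at h2 h1 <;>
      simp only at h2 h1 <;> subst h2
    · dsimp only
      rw [h1]
    · dsimp only
      rw [h1]
      have hRl : (pvR value 24).dropLast ++ [(s, (23 : Int))] = pvR value 24 :=
        List.dropLast_append_getLast? _ (by rw [hlast]; norm_num)
      have htail : pvSlotA (PySem.Int.floordiv (off + s) 2) (PySem.Int.mod (off + s) 2 * 30) ++ "-" ++
          pvSlotA (PySem.Int.floordiv (off + 24) 2) 0 = pvFmtB off (s, 23) := by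
        simp only [pvFmtB, pvHHMM, pvSlotA]
        rw [show off + 23 + 1 = off + 24 by ring, hoff2]
        norm_num
      rw [htail, ← hRl]
      simp
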